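-- pv_equiv track=rewrite | github.com/obabichev/acmp-py | 329.py | solution
-- ===== SOURCE A (Python) =====
-- def solution(n, stairs):
--     solutions = [(stairs[0], -1)]  # (<sum>, <prev_step>)
--
--     if stairs[0] > 0:
--         solutions.append((stairs[0] + stairs[1], 0))
--     else:
--         solutions.append((stairs[1], -1))
--
--     for i in range(2, len(stairs)):
--         if solutions[i - 1][0] > solutions[i - 2][0]:
--             solutions.append((solutions[i - 1][0] + stairs[i], i - 1))
--         else:
--             solutions.append((solutions[i - 2][0] + stairs[i], i - 2))
--
--     result_sum = solutions[-1][0]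
--     current_step = solutions[-1][1]
--     steps = [n - 1]
--     while current_step != -1:
--         steps.append(current_step)
--         current_step = solutions[current_step][1]
--
--     steps.reverse()
--
--     return result_sum, steps
-- ===== SOURCE B (Python) =====
-- def solution(n, stairs):
--     # Complement view: maximizing the visited sum equals minimizing the sum of
--     # skipped stairs (no two skips adjacent, the top stair never skipped).
--     # Single forward pass over the skip problem, carrying the skip list itself;
--     # ties prefer skipping (matching the strict comparison of the task).
--     m2, k2 = 0, []            # best skipped-sum / skip list ending before stair i-1
--     m1, k1 = 0, []            # best skipped-sum / skip list for a path visiting stair i-1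
--     for i in range(1, len(stairs)):
--         cand = m2 + stairs[i - 1]
--         if m1 < cand:
--             m2, k2, m1, k1 = m1, k1, m1, k1
--         else:
--             m2, k2, m1, k1 = m1, k1, cand, k2 + [i - 1]
--     steps = [j for j in range(len(stairs) - 1) if j not in k1] + [n - 1]
--     return sum(stairs) - m1, steps
-- ===== Notes on version B (the rewrite author's own statement) =====
-- stated objective: alternative
-- what changed: B solves the complement problem: instead of A's max-sum DP table with parent pointers plus a backward reconstruction walk, B minimizes the sum of SKIPPED stairs in one forward pass that carries the skip list itself (two rolling states, no table, no pointers, no backward phase), and derives the path by filtering the skipped indices out of range(len-1); answer = sum(stairs) - min skipped sum.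
import Mathlib
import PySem

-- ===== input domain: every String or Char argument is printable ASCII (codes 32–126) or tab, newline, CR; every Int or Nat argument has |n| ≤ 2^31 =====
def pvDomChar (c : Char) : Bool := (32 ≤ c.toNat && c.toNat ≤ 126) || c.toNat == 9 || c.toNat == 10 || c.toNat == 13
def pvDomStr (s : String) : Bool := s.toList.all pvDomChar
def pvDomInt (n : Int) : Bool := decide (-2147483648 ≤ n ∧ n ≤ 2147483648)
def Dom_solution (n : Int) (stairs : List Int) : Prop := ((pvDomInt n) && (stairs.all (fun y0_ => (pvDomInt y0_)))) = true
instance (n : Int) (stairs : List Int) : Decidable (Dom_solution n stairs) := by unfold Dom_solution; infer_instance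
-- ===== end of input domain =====

-- B replaces A's max-sum DP table with parent pointers and backward reconstruction by the
-- complement problem: one forward pass minimizing the skipped-stairs sum and carrying the
-- skip list; the path is range(len-1) with the skipped indices filtered out (objective: alternative).

-- ===== PORT A =====
-- body of A's 'for i in range(2, len(stairs))' loop
def stepA (stairs : List Int) (sols : List (Int × Int)) (i : Int) : List (Int × Int) :=
  if (PySem.List.pyGetD sols (i - 1) (0, 0)).1 > (PySem.List.pyGetD sols (i - 2) (0, 0)).1 then
    sols ++ [((PySem.List.pyGetD sols (i - 1) (0, 0)).1 + PySem.List.pyGetD stairs i 0, i - 1)]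
  else
    sols ++ [((PySem.List.pyGetD sols (i - 2) (0, 0)).1 + PySem.List.pyGetD stairs i 0, i - 2)]

-- A's 'while current_step != -1' loop; fuel only makes it total (the actual call always
-- terminates before the fuel runs out, which the equivalence proof establishes)
def whileA (sols : List (Int × Int)) : Nat → Int → List Int → List Int
  | 0, _, steps => steps
  | fuel + 1, c, steps =>
      if c = -1 then steps
      else whileA sols fuel (PySem.List.pyGetD sols c ((0 : Int), (0 : Int))).2 (steps ++ [c])

def solution (n : Int) (stairs : List Int) : Int × List Int :=
  let s0 := PySem.List.pyGetD stairs 0 0        -- stairs[0]; in range under Pre_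
  let s1 := PySem.List.pyGetD stairs 1 0        -- stairs[1]; in range under Pre_
  let sols1 : List (Int × Int) :=
    if s0 > 0 then [(s0, -1), (s0 + s1, 0)] else [(s0, -1), (s1, -1)]
  let sols := (PySem.List.pyRange 2 (stairs.length : Int) 1).foldl (stepA stairs) sols1
  let top := PySem.List.pyGetD sols (-1) ((0 : Int), (0 : Int))
  (top.1, (whileA sols (sols.length + 1) top.2 [n - 1]).reverse)

-- ===== PORT B =====
-- body of B's 'for i in range(1, len(stairs))' loop over the state (m2, k2, m1, k1)
def stepB (stairs : List Int) (st : Int × List Int × Int × List Int) (i : Int) :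
    Int × List Int × Int × List Int :=
  let cand := st.1 + PySem.List.pyGetD stairs (i - 1) 0
  if st.2.2.1 < cand then (st.2.2.1, st.2.2.2, st.2.2.1, st.2.2.2)
  else (st.2.2.1, st.2.2.2, cand, st.2.1 ++ [i - 1])

def solution_alt (n : Int) (stairs : List Int) : Int × List Int :=
  let st := (PySem.List.pyRange 1 (stairs.length : Int) 1).foldl (stepB stairs) (0, [], 0, [])
  (stairs.sum - st.2.2.1,
   ((PySem.List.pyRange 0 ((stairs.length : Int) - 1) 1).filter
       (fun j => !(st.2.2.2.contains j))) ++ [n - 1])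

-- ===== PRECONDITION & SPEC =====
-- A indexes stairs[0] and stairs[1]: it raises IndexError when len(stairs) < 2
def Pre_solution (n : Int) (stairs : List Int) : Prop := 2 ≤ stairs.length
instance (n : Int) (stairs : List Int) : Decidable (Pre_solution n stairs) := by
  unfold Pre_solution; infer_instance
def pvWitness_solution : Int × List Int := (3, [1, -2, 3])

def Spec_solution (n : Int) (stairs : List Int) (out : Int × List Int) : Prop := out = solution_alt n stairs
instance (n : Int) (stairs : List Int) (out : Int × List Int) : Decidable (Spec_solution n stairs out) := by unfold Spec_solution; infer_instance

-- ===== CLAIM (what is proved, stated in full; the proofs are below) =====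
def Claim_equal_solution : Prop := ∀ (n : Int) (stairs : List Int), Dom_solution n stairs → Pre_solution n stairs → Spec_solution n stairs (solution n stairs)

-- ===== LEMMAS AND PROOFS =====

-- best sum reachable at step j (specification value of A's forward pass)
def sumF (s : List Int) : Nat → Int
  | 0 => s.getD 0 0
  | 1 => if s.getD 0 0 > 0 then s.getD 0 0 + s.getD 1 0 else s.getD 1 0
  | (i + 2) =>
      (if sumF s (i + 1) > sumF s i then sumF s (i + 1) else sumF s i) + s.getD (i + 2) 0

-- parent pointer A stores at step j
def parF (s : List Int) : Nat → Int
  | 0 => -1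
  | 1 => if s.getD 0 0 > 0 then 0 else -1
  | (i + 2) => if sumF s (i + 1) > sumF s i then ((i : Int) + 1) else (i : Int)

def pairF (s : List Int) (j : Nat) : Int × Int := (sumF s j, parF s j)

-- prefix sum of the first j+1 stairs
def PF (s : List Int) : Nat → Int
  | 0 => s.getD 0 0
  | (j + 1) => PF s j + s.getD (j + 1) 0

-- spec value of B's fold state after iterations 1..i
def stF (s : List Int) : Nat → Int × List Int × Int × List Int
  | 0 => (0, [], 0, [])
  | (i + 1) =>
      let p := stF s i
      let cand := p.1 + s.getD i 0
      if p.2.2.1 < cand then (p.2.2.1, p.2.2.2, p.2.2.1, p.2.2.2)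
      else (p.2.2.1, p.2.2.2, cand, p.2.1 ++ [(i : Int)])

def mPrev (s : List Int) : Nat → Int
  | 0 => 0
  | (j + 1) => PF s j - sumF s j

-- skipped-index list of the optimal chain ending at stair i
def kA (s : List Int) : Nat → List Int
  | 0 => []
  | 1 => if s.getD 0 0 > 0 then [] else [(0 : Int)]
  | (i + 2) => if sumF s (i + 1) > sumF s i then kA s (i + 1) else kA s i ++ [(i : Int) + 1]

def kPrev (s : List Int) : Nat → List Int
  | 0 => []
  | (j + 1) => kA s j

-- ascending visited chain of A's reconstruction, ending at stair i
def chainA (s : List Int) : Nat → List Int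
  | 0 => [(0 : Int)]
  | 1 => if s.getD 0 0 > 0 then [(0 : Int), 1] else [(1 : Int)]
  | (i + 2) => (if sumF s (i + 1) > sumF s i then chainA s (i + 1) else chainA s i) ++ [(i : Int) + 2]

theorem parF_bounds (s : List Int) (m : Nat) : -1 ≤ parF s m ∧ parF s m ≤ (m : Int) - 1 := by
  match m with
  | 0 => simp [parF]
  | 1 => simp only [parF]; split_ifs <;> simp
  | (i + 2) => simp only [parF]; split_ifs <;> constructor <;> push_cast <;> omega

theorem getD_map_range' {α : Type} (f : Nat → α) (k n : Nat) (d : α) (h : k < n) :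
    (List.map f (List.range n)).getD k d = f k := by
  rw [List.getD_eq_getElem?_getD]
  simp [h]

theorem buildA_eq (s : List Int) :
    ∀ k : Nat, 2 ≤ k →
    (PySem.List.pyRange 2 (k : Int) 1).foldl (stepA s)
      (if s.getD 0 0 > 0 then [(s.getD 0 0, -1), (s.getD 0 0 + s.getD 1 0, 0)]
       else [(s.getD 0 0, -1), (s.getD 1 0, -1)])
    = (List.range k).map (pairF s) := by
  intro k hk
  induction k with
  | zero => omega
  | succ k ih =>
    rcases Nat.lt_or_ge k 2 with hk2 | hk2
    · interval_cases k
      · omega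
      · rw [PySem.List.pyRange_one_eq_nil (by norm_num)]
        simp only [List.foldl_nil, List.range_succ, List.range_zero, List.map_append,
          List.map_cons, List.map_nil, List.nil_append, pairF, sumF, parF]
        split_ifs <;> rfl
    · rw [show ((k + 1 : Nat) : Int) = (k : Int) + 1 by push_cast; ring,
        PySem.List.pyRange_one_succ_right (by exact_mod_cast hk2),
        List.foldl_append, ih hk2]
      simp only [List.foldl_cons, List.foldl_nil, stepA]
      have e1 : ((k : Int) - 1) = ((k - 1 : Nat) : Int) := by omega
      have e2 : ((k : Int) - 2) = ((k - 2 : Nat) : Int) := by omega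
      rw [e1, e2, PySem.List.pyGetD_natCast, PySem.List.pyGetD_natCast,
        PySem.List.pyGetD_natCast,
        getD_map_range' _ _ _ _ (by omega), getD_map_range' _ _ _ _ (by omega)]
      rw [List.range_succ, List.map_append]
      obtain ⟨i, rfl⟩ : ∃ i, k = i + 2 := ⟨k - 2, by omega⟩
      rw [show i + 2 - 1 = i + 1 from by omega, show i + 2 - 2 = i from by omega]
      simp only [List.map_cons, List.map_nil, pairF]
      rw [sumF, parF]
      split_ifs with h <;>
        simp only [List.append_cancel_left_eq, List.cons.injEq, Prod.mk.injEq, and_true] <;>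
        constructor <;> push_cast <;> omega

theorem buildB_eq (s : List Int) :
    ∀ k : Nat, 1 ≤ k →
    (PySem.List.pyRange 1 (k : Int) 1).foldl (stepB s) (0, [], 0, []) = stF s (k - 1) := by
  intro k hk
  induction k with
  | zero => omega
  | succ k ih =>
    rcases Nat.lt_or_ge k 1 with hk1 | hk1
    · interval_cases k
      rw [PySem.List.pyRange_one_eq_nil (by norm_num)]
      rfl
    · rw [show ((k + 1 : Nat) : Int) = (k : Int) + 1 by push_cast; ring,
        PySem.List.pyRange_one_succ_right (by exact_mod_cast hk1),
        List.foldl_append, ih hk1]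
      simp only [List.foldl_cons, List.foldl_nil, stepB]
      have e1 : ((k : Int) - 1) = ((k - 1 : Nat) : Int) := by omega
      rw [e1, PySem.List.pyGetD_natCast]
      obtain ⟨i, rfl⟩ : ∃ i, k = i + 1 := ⟨k - 1, by omega⟩
      rw [show i + 1 + 1 - 1 = i + 1 from by omega, show i + 1 - 1 = i from by omega]
      rw [stF]

theorem stF_m (s : List Int) :
    ∀ i : Nat, (stF s i).2.2.1 = PF s i - sumF s i ∧ (stF s i).1 = mPrev s i := by
  intro i
  induction i with
  | zero => simp [stF, PF, sumF, mPrev]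
  | succ i ih =>
    obtain ⟨ih1, ih2⟩ := ih
    have e : stF s (i + 1) =
        (if (stF s i).2.2.1 < (stF s i).1 + s.getD i 0 then
           ((stF s i).2.2.1, (stF s i).2.2.2, (stF s i).2.2.1, (stF s i).2.2.2)
         else ((stF s i).2.2.1, (stF s i).2.2.2, (stF s i).1 + s.getD i 0,
           (stF s i).2.1 ++ [(i : Int)])) := by rw [stF]
    rw [e]
    refine ⟨?_, ?_⟩
    · match i, ih1, ih2 with
      | 0, ih1, ih2 =>
        rw [ih1, ih2] at *
        simp only [mPrev, PF, sumF] at *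
        split_ifs <;> simp <;> omega
      | (j + 1), ih1, ih2 =>
        rw [ih1, ih2] at *
        simp only [mPrev] at *
        rw [show j + 1 + 1 = j + 2 from rfl]
        simp only [PF, sumF]
        split_ifs <;> simp <;> omega
    · split_ifs <;> simp [ih1, mPrev]

theorem stF_k (s : List Int) :
    ∀ i : Nat, (stF s i).2.2.2 = kA s i ∧ (stF s i).2.1 = kPrev s i := by
  intro i
  induction i with
  | zero => simp [stF, kA, kPrev]
  | succ i ih =>
    obtain ⟨ih1, ih2⟩ := ih
    have e : stF s (i + 1) =
        (if (stF s i).2.2.1 < (stF s i).1 + s.getD i 0 then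
           ((stF s i).2.2.1, (stF s i).2.2.2, (stF s i).2.2.1, (stF s i).2.2.2)
         else ((stF s i).2.2.1, (stF s i).2.2.2, (stF s i).1 + s.getD i 0,
           (stF s i).2.1 ++ [(i : Int)])) := by rw [stF]
    rw [e]
    refine ⟨?_, ?_⟩
    · match i, ih1, ih2 with
      | 0, ih1, ih2 =>
        simp only [stF, kA]
        split_ifs <;> first | rfl | (exfalso; omega)
      | (j + 1), ih1, ih2 =>
        have hm1 := (stF_m s (j + 1)).1
        have hm2 := (stF_m s (j + 1)).2
        have hc : ((stF s (j + 1)).2.2.1 < (stF s (j + 1)).1 + s.getD (j + 1) 0)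
            ↔ sumF s (j + 1) > sumF s j := by
          rw [hm1, hm2]
          simp only [mPrev, PF]
          constructor <;> intro <;> omega
        rw [show j + 1 + 1 = j + 2 from rfl, kA]
        by_cases h : sumF s (j + 1) > sumF s j
        · rw [if_pos (hc.mpr h), if_pos h]
          exact ih1
        · rw [if_neg (fun hh => h (hc.mp hh)), if_neg h]
          show (stF s (j + 1)).2.1 ++ [((j + 1 : Nat) : Int)] = kA s j ++ [(j : Int) + 1]
          rw [ih2]
          simp only [kPrev]
          norm_cast
    · split_ifs <;> simpa [kPrev] using ih1

theorem kA_bounds (s : List Int) :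
    ∀ i : Nat, ∀ x ∈ kA s i, 0 ≤ x ∧ x ≤ (i : Int) - 1 := by
  intro i
  induction i using Nat.strong_induction_on with
  | _ i ih =>
    match i with
    | 0 => simp [kA]
    | 1 =>
      simp only [kA]
      split_ifs <;> simp
    | (j + 2) =>
      simp only [kA]
      split_ifs with h
      · intro x hx
        have := ih (j + 1) (by omega) x hx
        push_cast at *
        omega
      · intro x hx
        rw [List.mem_append] at hx
        rcases hx with hx | hx
        · have := ih j (by omega) x hx
          push_cast at *
          omega
        · simp at hx
          subst hx
          push_cast
          omega

theorem chain_filter (s : List Int) :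
    ∀ i : Nat, chainA s i
      = ((List.range (i + 1)).map (fun j : Nat => (j : Int))).filter
          (fun j => !((kA s i).contains j)) := by
  intro i
  induction i using Nat.strong_induction_on with
  | _ i ih =>
    match i with
    | 0 => simp [chainA, kA]
    | 1 =>
      simp only [chainA, kA]
      split_ifs with h <;> simp [List.range_succ]
    | (j + 2) =>
      simp only [chainA, kA]
      split_ifs with h
      · have hnm : ((j + 2 : Nat) : Int) ∉ kA s (j + 1) := by
          intro hm
          have := kA_bounds s (j + 1) _ hm
          push_cast at this
          omega
        have e1 : (!((kA s (j + 1)).contains ((j + 2 : Nat) : Int))) = true := by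
          simpa using hnm
        conv_rhs => rw [List.range_succ]
        rw [List.map_append, List.filter_append, ih (j + 1) (by omega),
          show j + 1 + 1 = j + 2 from rfl]
        congr 1
        simp only [List.map_cons, List.map_nil, List.filter_cons, List.filter_nil, e1,
          if_true]
        norm_cast
      · rw [ih j (by omega)]
        have hr : List.range (j + 2 + 1) = List.range (j + 1) ++ [j + 1, j + 2] := by
          rw [List.range_succ, List.range_succ, List.append_assoc]
          rfl
        rw [hr, List.map_append, List.filter_append]
        congr 1
        · apply List.filter_congr
          intro x hx
          obtain ⟨k, hk, rfl⟩ : ∃ k, k < j + 1 ∧ ((k : Nat) : Int) = x := by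
            simpa using hx
          have hne : ((k : Nat) : Int) ≠ (j : Int) + 1 := by push_cast; omega
          simp [hne]
        · have h1 : ((j + 1 : Nat) : Int) ∈ kA s j ++ [(j : Int) + 1] := by
            rw [List.mem_append]
            right
            simp
          have h2 : ((j + 2 : Nat) : Int) ∉ kA s j ++ [(j : Int) + 1] := by
            intro hm
            rw [List.mem_append] at hm
            rcases hm with hm | hm
            · have := kA_bounds s j _ hm
              push_cast at this
              omega
            · simp at hm
          have e1 : (!((kA s j ++ [(j : Int) + 1]).contains ((j + 1 : Nat) : Int))) = false := by
            simpa using h1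
          have e2 : (!((kA s j ++ [(j : Int) + 1]).contains ((j + 2 : Nat) : Int))) = true := by
            simpa using h2
          simp only [List.map_cons, List.map_nil, List.filter_cons, List.filter_nil, e1, e2,
            if_true, Bool.false_eq_true, if_false]
          norm_cast

theorem chainA_parent (s : List Int) :
    ∀ m : Nat, chainA s m
      = (if parF s m = -1 then [] else chainA s ((parF s m).toNat)) ++ [(m : Int)] := by
  intro m
  match m with
  | 0 => simp [chainA, parF]
  | 1 =>
    simp only [chainA, parF]
    by_cases h : s.getD 0 0 > 0
    · rw [if_pos h, if_pos h, if_neg (by omega)]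
      norm_num [chainA]
    · rw [if_neg h, if_neg h, if_pos rfl]
      norm_num
  | (j + 2) =>
    simp only [chainA, parF]
    by_cases h : sumF s (j + 1) > sumF s j
    · rw [if_pos h, if_pos h, if_neg (by omega),
        show ((j : Int) + 1).toNat = j + 1 from by omega]
      norm_cast
    · rw [if_neg h, if_neg h, if_neg (by omega), Int.toNat_natCast]
      norm_cast

theorem whileA_chain (s : List Int) :
    ∀ t : Nat, ∀ c : Int, ∀ fuel : Nat, ∀ steps : List Int,
    -1 ≤ c → c < (s.length : Int) → (c + 1).toNat ≤ t → (c + 1).toNat < fuel →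
    whileA ((List.range s.length).map (pairF s)) fuel c steps
      = steps ++ (if c = -1 then [] else (chainA s c.toNat).reverse) := by
  intro t
  induction t with
  | zero =>
    intro c fuel steps h1 h2 h3 h4
    have hc : c = -1 := by omega
    obtain ⟨f, rfl⟩ : ∃ f, fuel = f + 1 := ⟨fuel - 1, by omega⟩
    subst hc
    simp [whileA]
  | succ t ih =>
    intro c fuel steps h1 h2 h3 h4
    obtain ⟨f, rfl⟩ : ∃ f, fuel = f + 1 := ⟨fuel - 1, by omega⟩
    by_cases hc : c = -1
    · subst hc
      simp [whileA]
    · have hc0 : 0 ≤ c := by omega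
      have hget : PySem.List.pyGetD ((List.range s.length).map (pairF s)) c ((0:Int),(0:Int))
          = pairF s c.toNat := by
        conv_lhs => rw [show c = ((c.toNat : Nat) : Int) from by omega]
        rw [PySem.List.pyGetD_natCast, getD_map_range' _ _ _ _ (by omega)]
      have hb := parF_bounds s c.toNat
      rw [whileA, if_neg hc, hget]
      simp only [pairF]
      rw [ih (parF s c.toNat) f (steps ++ [c]) (by omega) (by omega) (by omega) (by omega)]
      have hp := chainA_parent s c.toNat
      by_cases hpar : parF s c.toNat = -1
      · rw [if_pos hpar] at hp ⊢
        rw [if_neg hc, hp]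
        simp
        omega
      · rw [if_neg hpar] at hp ⊢
        rw [if_neg hc, hp]
        simp
        omega

theorem take_sum_PF (s : List Int) : ∀ k : Nat, k < s.length → (s.take (k + 1)).sum = PF s k := by
  intro k
  induction k with
  | zero =>
    intro h
    rw [List.take_succ, List.take_zero]
    simp [PF, List.getD_eq_getElem?_getD, List.getElem?_eq_getElem h]
  | succ k ih =>
    intro h
    rw [List.take_succ, List.sum_append, ih (by omega)]
    simp [PF, List.getElem?_eq_getElem h, List.getD_eq_getElem?_getD]

theorem sum_eq_PF (s : List Int) : ∀ k : Nat, k + 1 = s.length → s.sum = PF s k := by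
  intro k hk
  rw [← take_sum_PF s k (by omega), hk, List.take_length]

-- ===== VERDICT (by name: the statement is the Claim_ definition above) =====
theorem solution_spec : Claim_equal_solution := by
  intro n s _ hpre
  unfold Pre_solution at hpre
  unfold Spec_solution solution solution_alt
  have hg0 : PySem.List.pyGetD s 0 0 = s.getD 0 0 := PySem.List.pyGetD_zero s 0
  have hg1 : PySem.List.pyGetD s 1 0 = s.getD 1 0 := by
    rw [show (1 : Int) = ((1 : Nat) : Int) by norm_num, PySem.List.pyGetD_natCast]
  have hA := buildA_eq s s.length hpre
  have hB := buildB_eq s s.length (by omega)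
  simp only [hg0, hg1, hA, hB]
  have hk := (stF_k s (s.length - 1)).1
  have hm := (stF_m s (s.length - 1)).1
  rw [hk, hm]
  have hlen : ((List.range s.length).map (pairF s)).length = s.length := by simp
  have hne : ((List.range s.length).map (pairF s)) ≠ [] := by
    simp only [ne_eq, List.map_eq_nil_iff, List.range_eq_nil]
    omega
  have hlastA : PySem.List.pyGetD ((List.range s.length).map (pairF s)) (-1) ((0:Int),(0:Int))
      = pairF s (s.length - 1) := by
    rw [PySem.List.pyGetD_neg_one _ _ hne, List.getLast_eq_getElem]
    simp [hlen]
  rw [hlastA, hlen]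
  have hb := parF_bounds s (s.length - 1)
  have hloop := whileA_chain s ((parF s (s.length - 1) + 1).toNat) (parF s (s.length - 1))
    (s.length + 1) [n - 1] hb.1 (by omega) (le_refl _) (by omega)
  simp only [pairF]
  rw [hloop]
  rw [Prod.mk.injEq]
  constructor
  · rw [sum_eq_PF s (s.length - 1) (by omega)]
    ring
  · rw [List.reverse_append, apply_ite List.reverse, List.reverse_nil, List.reverse_reverse]
    congr 1
    rw [show ((s.length : Int) - 1) = ((s.length - 1 : Nat) : Int) from by omega,
      PySem.List.pyRange_zero_natCast]
    have hcf := chain_filter s (s.length - 1)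
    rw [show s.length - 1 + 1 = s.length from by omega] at hcf
    have hpar := chainA_parent s (s.length - 1)
    have hsplit : ((List.range s.length).map (fun j : Nat => (j : Int))).filter
          (fun j => !((kA s (s.length - 1)).contains j))
        = ((List.range (s.length - 1)).map (fun j : Nat => (j : Int))).filter
            (fun j => !((kA s (s.length - 1)).contains j)) ++ [((s.length - 1 : Nat) : Int)] := by
      conv_lhs => rw [show s.length = (s.length - 1) + 1 from by omega, List.range_succ]
      rw [List.map_append, List.filter_append]
      congr 1
      have hnm : ((s.length - 1 : Nat) : Int) ∉ kA s (s.length - 1) := by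
        intro hmem
        have := kA_bounds s (s.length - 1) _ hmem
        omega
      have e1 : (!((kA s (s.length - 1)).contains ((s.length - 1 : Nat) : Int))) = true := by
        simpa using hnm
      simp only [List.map_cons, List.map_nil, List.filter_cons, List.filter_nil,
        show s.length - 1 + 1 - 1 = s.length - 1 from by omega, e1, if_true]
    rw [hsplit] at hcf
    rw [hpar] at hcf
    exact List.append_cancel_right hcf
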